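-- pv_equiv track=rewrite | github.com/maninka123/tennis-tour-dashboard | scripts/[Only once] wta_scrape_wtatennis.py | _slice_section
-- ===== SOURCE A (Python) =====
-- from typing import Any, Dict, List, Optional, Tuple
--
-- def _slice_section(text: str, start_label: str, next_labels: List[str]) -> str:
--     lower = text.lower()
--     start = lower.find(start_label.lower())
--     if start == -1:
--         return ""
--     end = len(text)
--     for label in next_labels:
--         idx = lower.find(label.lower(), start + len(start_label))
--         if idx != -1:
--             end = min(end, idx)
--     return text[start:end]
-- ===== SOURCE B (Python) =====
-- def _slice_section(text, start_label, next_labels):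
--     lower = text.lower()
--     start = lower.find(start_label.lower())
--     if start == -1:
--         return ""
--     keys = [label.lower() for label in next_labels]
--     end = len(text)
--     for pos in range(start + len(start_label), len(text) + 1):
--         if any(lower.startswith(k, pos) for k in keys):
--             end = pos
--             break
--     return text[start:end]
-- ===== Notes on version B (the rewrite author's own statement) =====
-- stated objective: alternative
-- what changed: A runs a separate case-insensitive str.find scan per next-label and takes the minimum hit; B instead does a single left-to-right scan over positions from start+len(start_label), stopping at the first position where any lower-cased label starts, so the min over per-label scans disappears.
import Mathlib
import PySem

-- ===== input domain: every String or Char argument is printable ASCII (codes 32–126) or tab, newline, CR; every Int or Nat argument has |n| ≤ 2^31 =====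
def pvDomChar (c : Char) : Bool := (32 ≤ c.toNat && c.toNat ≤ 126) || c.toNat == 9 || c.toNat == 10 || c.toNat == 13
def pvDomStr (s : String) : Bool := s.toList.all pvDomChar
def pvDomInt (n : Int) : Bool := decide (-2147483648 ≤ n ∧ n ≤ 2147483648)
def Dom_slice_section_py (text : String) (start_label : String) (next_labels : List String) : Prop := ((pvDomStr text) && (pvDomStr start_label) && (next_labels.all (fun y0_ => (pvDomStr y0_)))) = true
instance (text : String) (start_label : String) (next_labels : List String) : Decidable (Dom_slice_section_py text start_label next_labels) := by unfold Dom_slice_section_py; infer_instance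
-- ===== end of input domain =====

-- B replaces A's per-label find scans by ONE left-to-right position scan that stops at the
-- first position where any (lower-cased) next-label starts; objective: alternative.

-- ===== PORT A =====
def slice_section_py (text : String) (start_label : String) (next_labels : List String) : String :=
  let lower := PySem.Str.lower text
  let start := PySem.Str.find lower (PySem.Str.lower start_label)
  if start = -1 then ""
  else
    let endv : Int := next_labels.foldl
      (fun e label =>
        let idx := PySem.Str.findFrom lower (PySem.Str.lower label)
          (start + PySem.Str.len start_label) none
        if idx ≠ -1 then min e idx else e)
      (PySem.Str.len text)
    PySem.Str.slice text (some start) (some endv)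

-- ===== PORT B =====
-- Source B: scan pos = start+len(start_label) … len(text); stop at the first pos where some
-- lower-cased label starts (lower.startswith(k, pos) = k is a prefix of lower[pos:], exact).
def slice_section_py_alt (text : String) (start_label : String) (next_labels : List String) : String :=
  let lower := PySem.Str.lower text
  let start := PySem.Str.find lower (PySem.Str.lower start_label)
  if start = -1 then ""
  else
    let keys := next_labels.map (fun label => (PySem.Str.lower label).toList)
    let b0 := start.toNat + (PySem.Str.len start_label).toNat
    let endv : Nat :=
      ((List.range' b0 ((PySem.Str.len text).toNat + 1 - b0)).find?
        (fun pos => keys.any (fun k => PySem.Chars.startswith (lower.toList.drop pos) k))).getD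
        (PySem.Str.len text).toNat
    PySem.Str.slice text (some start) (some (endv : Int))

-- ===== PRECONDITION & SPEC =====
def Spec_slice_section_py (text : String) (start_label : String) (next_labels : List String) (out : String) : Prop := out = slice_section_py_alt text start_label next_labels
instance (text : String) (start_label : String) (next_labels : List String) (out : String) : Decidable (Spec_slice_section_py text start_label next_labels out) := by unfold Spec_slice_section_py; infer_instance

-- ===== CLAIM (what is proved, stated in full; the proofs are below) =====
def Claim_equal_slice_section_py : Prop := ∀ (text : String) (start_label : String) (next_labels : List String), Dom_slice_section_py text start_label next_labels → Spec_slice_section_py text start_label next_labels (slice_section_py text start_label next_labels)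

-- ===== LEMMAS AND PROOFS =====

-- the loop body of port A, at the List-Char level
def stepA (L : List Char) (b : Nat) (e : Int) (k : List Char) : Int :=
  let idx := PySem.Chars.findFrom L k ((b : Nat) : Int) none
  if idx ≠ -1 then min e idx else e

theorem lower_length (xs : List Char) : (PySem.Chars.lower xs).length = xs.length := by
  simp [PySem.Chars.lower]

theorem stepA_absent {L : List Char} {b : Nat} (hb : b ≤ L.length) {k : List Char}
    (hf : PySem.Chars.find (L.drop b) k = -1) (e : Int) : stepA L b e k = e := by
  simp [stepA, PySem.Chars.findFrom_natCast L k b hb, hf]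

theorem stepA_present {L : List Char} {b : Nat} (hb : b ≤ L.length) {k : List Char}
    (hf : ¬ PySem.Chars.find (L.drop b) k = -1) (e : Int) :
    stepA L b e k = min e ((b : Int) + PySem.Chars.find (L.drop b) k) := by
  have hnn : 0 ≤ PySem.Chars.find (L.drop b) k := by
    have := PySem.Chars.neg_one_le_find (L.drop b) k; omega
  simp only [stepA, PySem.Chars.findFrom_natCast L k b hb, if_neg hf, ne_eq]
  rw [if_pos (by omega)]

-- A's fold: the result r is bounded, is either the initial e or a match position, and no
-- position in [b, r) carries a match of any processed label.
theorem foldA_spec (L : List Char) (key : String → List Char) (b : Nat) (hb : b ≤ L.length) :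
    ∀ (ks : List String) (e : Int), (b : Int) ≤ e →
      (b : Int) ≤ ks.foldl (fun e lab => stepA L b e (key lab)) e ∧
      ks.foldl (fun e lab => stepA L b e (key lab)) e ≤ e ∧
      (ks.foldl (fun e lab => stepA L b e (key lab)) e = e ∨
        ∃ lab ∈ ks, key lab <+: L.drop (ks.foldl (fun e lab => stepA L b e (key lab)) e).toNat) ∧
      (∀ pos : Nat, b ≤ pos → (pos : Int) < ks.foldl (fun e lab => stepA L b e (key lab)) e →
        ∀ lab ∈ ks, ¬ key lab <+: L.drop pos) := by
  intro ks
  induction ks with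
  | nil => intro e he; simp; exact he
  | cons lab ks ih =>
    intro e he
    simp only [List.foldl_cons]
    by_cases hf : PySem.Chars.find (L.drop b) (key lab) = -1
    · -- label absent from L.drop b: accumulator unchanged
      rw [stepA_absent hb hf]
      have hnone : ¬ key lab <:+: L.drop b := (PySem.Chars.find_eq_neg_one_iff _ _).mp hf
      obtain ⟨h1, h2, h3, h4⟩ := ih e he
      refine ⟨h1, h2, ?_, ?_⟩
      · rcases h3 with h3 | ⟨l, hl, hp⟩
        · exact Or.inl h3
        · exact Or.inr ⟨l, List.mem_cons_of_mem _ hl, hp⟩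
      · intro pos hbp hpr l hl
        rcases List.mem_cons.mp hl with rfl | hl
        · intro hpre
          refine hnone ?_
          have hdd : L.drop pos = (L.drop b).drop (pos - b) := by
            rw [List.drop_drop]; congr 1; omega
          rw [hdd] at hpre
          exact hpre.isInfix.trans (List.drop_suffix _ _).isInfix
        · exact h4 pos hbp hpr l hl
    · -- label found at j := find (L.drop b) (key lab); idx = b + j
      rw [stepA_present hb hf]
      have hnn : 0 ≤ PySem.Chars.find (L.drop b) (key lab) := by
        have := PySem.Chars.neg_one_le_find (L.drop b) (key lab); omega
      set j := PySem.Chars.find (L.drop b) (key lab) with hj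
      obtain ⟨hfirstp, hfirstm⟩ := PySem.Chars.find_spec hnn
      have hmatch : key lab <+: L.drop ((b : Int) + j).toNat := by
        have htn : ((b : Int) + j).toNat = b + j.toNat := by omega
        rw [htn, ← List.drop_drop]
        exact hfirstp
      have hminlab : ∀ pos : Nat, b ≤ pos → (pos : Int) < (b : Int) + j →
          ¬ key lab <+: L.drop pos := by
        intro pos hbp hlt hpre
        refine hfirstm (pos - b) (by omega) ?_
        have hdd : (L.drop b).drop (pos - b) = L.drop pos := by
          rw [List.drop_drop]; congr 1; omega
        rw [hdd]; exact hpre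
      rcases (by omega : e ≤ (b : Int) + j ∨ (b : Int) + j < e) with hle | hlt
      · rw [min_eq_left hle]
        obtain ⟨h1, h2, h3, h4⟩ := ih e he
        refine ⟨h1, h2, ?_, ?_⟩
        · rcases h3 with h3 | ⟨l, hl, hp⟩
          · exact Or.inl h3
          · exact Or.inr ⟨l, List.mem_cons_of_mem _ hl, hp⟩
        · intro pos hbp hpr l hl
          rcases List.mem_cons.mp hl with rfl | hl
          · exact hminlab pos hbp (lt_of_lt_of_le hpr (h2.trans hle))
          · exact h4 pos hbp hpr l hl
      · rw [min_eq_right hlt.le]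
        obtain ⟨h1, h2, h3, h4⟩ := ih ((b : Int) + j) (by omega)
        refine ⟨h1, le_trans h2 hlt.le, ?_, ?_⟩
        · rcases h3 with h3 | ⟨l, hl, hp⟩
          · exact Or.inr ⟨lab, List.mem_cons_self, by rw [h3]; exact hmatch⟩
          · exact Or.inr ⟨l, List.mem_cons_of_mem _ hl, hp⟩
        · intro pos hbp hpr l hl
          rcases List.mem_cons.mp hl with rfl | hl
          · exact hminlab pos hbp (lt_of_lt_of_le hpr h2)
          · exact h4 pos hbp hpr l hl

-- find? on range' b m returns the first satisfying position.
theorem find?_range'_first (p : Nat → Bool) :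
    ∀ (m b x : Nat), (List.range' b m).find? p = some x →
      p x = true ∧ b ≤ x ∧ x < b + m ∧ ∀ j, b ≤ j → j < x → p j = false := by
  intro m
  induction m with
  | zero => intro b x h; simp [List.range'] at h
  | succ m ih =>
    intro b x h
    rw [List.range'_succ] at h
    by_cases hpb : p b = true
    · rw [List.find?_cons_of_pos hpb] at h
      cases h
      exact ⟨hpb, le_refl _, by omega, fun j h1 h2 => absurd h2 (by omega)⟩
    · rw [List.find?_cons_of_neg (by simpa using hpb)] at h
      obtain ⟨hx, hbx, hxm, hmin⟩ := ih (b + 1) x h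
      refine ⟨hx, by omega, by omega, ?_⟩
      intro j h1 h2
      rcases Nat.eq_or_lt_of_le h1 with rfl | h1
      · simpa using hpb
      · exact hmin j (by omega) h2

-- ===== VERDICT (by name: the statement is the Claim_ definition above) =====
theorem slice_section_py_spec : Claim_equal_slice_section_py := by
  intro text start_label next_labels _dom
  unfold Spec_slice_section_py slice_section_py slice_section_py_alt
  simp only []
  by_cases hs : PySem.Str.find (PySem.Str.lower text) (PySem.Str.lower start_label) = -1
  · rw [if_pos hs, if_pos hs]
  · rw [if_neg hs, if_neg hs]
    set L : List Char := PySem.Chars.lower text.toList with hL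
    set s0 : Int := PySem.Str.find (PySem.Str.lower text) (PySem.Str.lower start_label) with hs0
    have hfindc : s0 = PySem.Chars.find L (PySem.Chars.lower start_label.toList) := by
      rw [hs0, hL]; simp
    have h0 : 0 ≤ s0 := by
      have := PySem.Chars.neg_one_le_find L (PySem.Chars.lower start_label.toList)
      rw [← hfindc] at this
      omega
    have hLlen : L.length = text.length := by rw [hL]; exact lower_length _
    have hsllen : (PySem.Chars.lower start_label.toList).length = start_label.length := by
      simpa using lower_length start_label.toList
    have hlen_text : PySem.Str.len text = (text.length : Int) := by simp
    have hlen_sl : PySem.Str.len start_label = (start_label.length : Int) := by simp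
    have hfc0 : 0 ≤ PySem.Chars.find L (PySem.Chars.lower start_label.toList) := by omega
    obtain ⟨hpre0, -⟩ := PySem.Chars.find_spec hfc0
    have hpre0len := hpre0.length_le
    rw [List.length_drop, hsllen, hLlen] at hpre0len
    have hfle := PySem.Chars.find_le_length L (PySem.Chars.lower start_label.toList)
    rw [hLlen] at hfle
    have hb0n : s0.toNat + start_label.length ≤ text.length := by omega
    set b0 : Nat := s0.toNat + start_label.length with hb0
    set n : Nat := text.length with hn
    have hb0L : b0 ≤ L.length := by rw [hLlen, hb0]; omega
    -- port A's fold is the stepA fold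
    have hseed : PySem.Str.len text = ((n : Nat) : Int) := by rw [hn]; exact hlen_text
    have harg : s0 + PySem.Str.len start_label = ((b0 : Nat) : Int) := by
      rw [hlen_sl, hb0]; push_cast; omega
    have hfoldA : (next_labels.foldl
        (fun e label =>
          let idx := PySem.Str.findFrom (PySem.Str.lower text) (PySem.Str.lower label)
            (s0 + PySem.Str.len start_label) none
          if idx ≠ -1 then min e idx else e) (PySem.Str.len text)) =
        next_labels.foldl (fun e lab => stepA L b0 e (PySem.Chars.lower lab.toList)) ((n : Nat) : Int) := by
      rw [hseed]
      have hfun : (fun (e : Int) (label : String) =>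
          let idx := PySem.Str.findFrom (PySem.Str.lower text) (PySem.Str.lower label)
            (s0 + PySem.Str.len start_label) none
          if idx ≠ -1 then min e idx else e) =
          (fun e lab => stepA L b0 e (PySem.Chars.lower lab.toList)) := by
        funext e lab
        rw [harg]
        simp [stepA, hL]
      rw [hfun]
    obtain ⟨ha1, ha2, ha3, ha4⟩ := foldA_spec L (fun lab => PySem.Chars.lower lab.toList) b0 hb0L
      next_labels ((n : Nat) : Int) (by exact_mod_cast (by omega : b0 ≤ n))
    rw [hfoldA]
    set r : Int := next_labels.foldl (fun e lab => stepA L b0 e (PySem.Chars.lower lab.toList)) ((n : Nat) : Int) with hr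
    -- B side
    set p : Nat → Bool := fun pos =>
      (next_labels.map fun label => (PySem.Str.lower label).toList).any
        (fun k => PySem.Chars.startswith ((PySem.Str.lower text).toList.drop pos) k) with hp
    have hpiff : ∀ pos : Nat, p pos = true ↔
        ∃ lab ∈ next_labels, PySem.Chars.lower lab.toList <+: L.drop pos := by
      intro pos
      rw [hp, hL]
      simp [List.any_eq_true, PySem.Chars.startswith_iff]
    have hb0eq : s0.toNat + (PySem.Str.len start_label).toNat = b0 := by
      rw [hlen_sl, hb0]; omega
    have hrange : (PySem.Str.len text).toNat + 1 - (s0.toNat + (PySem.Str.len start_label).toNat)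
        = n + 1 - b0 := by rw [hlen_text, hb0eq, hn]; omega
    have hgd : (PySem.Str.len text).toNat = n := by rw [hlen_text, hn]; omega
    rw [hrange, hb0eq, hgd]
    -- both ends agree
    have hend : r = (((List.range' b0 (n + 1 - b0)).find? p).getD n : Int) := by
      cases hfq : (List.range' b0 (n + 1 - b0)).find? p with
      | none =>
        simp only [Option.getD_none]
        have hall := List.find?_eq_none.mp hfq
        rcases ha3 with h3 | ⟨lab, hlab, hpref⟩
        · rw [h3]
        · exfalso
          have hbr : (b0 : Int) ≤ r := ha1
          have hrn : r ≤ (n : Int) := ha2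
          have hmem : r.toNat ∈ List.range' b0 (n + 1 - b0) := by
            rw [List.mem_range'_1]
            omega
          exact (hall _ hmem) ((hpiff r.toNat).mpr ⟨lab, hlab, hpref⟩)
      | some x =>
        simp only [Option.getD_some]
        obtain ⟨hpx, hbx, hxn, hxmin⟩ := find?_range'_first p _ _ _ hfq
        have hxr : ¬ ((x : Int) < r) := by
          intro hlt
          obtain ⟨lab, hlab, hpref⟩ := (hpiff x).mp hpx
          exact ha4 x hbx hlt lab hlab hpref
        have hrx : ¬ (r < (x : Int)) := by
          intro hlt
          have hbr : (b0 : Int) ≤ r := ha1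
          rcases ha3 with h3 | ⟨lab, hlab, hpref⟩
          · omega
          · have hfalse := hxmin r.toNat (by omega) (by omega)
            exact absurd ((hpiff r.toNat).mpr ⟨lab, hlab, hpref⟩) (by simp [hfalse])
        omega
    rw [hend]
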